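-- pv_equiv track=rewrite | github.com/yanis-san/torii-administration | certificate/generator.py | detect_language_from_subject
-- ===== SOURCE A (Python) =====
-- def detect_language_from_subject(subject_name: str) -> str | None:
--     """
--     Détecte le code langue à partir du nom du sujet.
--     Retourne 'cn', 'kr', 'jp' ou None si non supporté.
--     """
--     name_lower = subject_name.lower()
--
--     if any(x in name_lower for x in ['chinois', 'chinese', 'mandarin', '中文']):
--         return 'cn'
--     elif any(x in name_lower for x in ['coréen', 'coreen', 'corée', 'coree', 'korean', '한국어']):
--         return 'kr'
--     elif any(x in name_lower for x in ['japonais', 'japanese', 'japon', '日本語']):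
--         return 'jp'
--
--     return None
-- ===== SOURCE B (Python) =====
-- # B: single left-to-right scan of the lowercased subject, matching all keywords
-- # positionally (naive multi-pattern matcher) into a set of codes, then a
-- # priority lookup resolves cn > kr > jp.
-- KEYWORD_CODES = [
--     ('chinois', 'cn'), ('chinese', 'cn'), ('mandarin', 'cn'), ('中文', 'cn'),
--     ('coréen', 'kr'), ('coreen', 'kr'), ('corée', 'kr'), ('coree', 'kr'),
--     ('korean', 'kr'), ('한국어', 'kr'),
--     ('japonais', 'jp'), ('japanese', 'jp'), ('japon', 'jp'), ('日本語', 'jp'),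
-- ]
-- PRIORITY = ('cn', 'kr', 'jp')
--
-- def detect_language_from_subject(subject_name: str) -> str | None:
--     s = subject_name.lower()
--     found = set()
--     for i in range(len(s)):
--         for kw, code in KEYWORD_CODES:
--             if s.startswith(kw, i):
--                 found.add(code)
--     for code in PRIORITY:
--         if code in found:
--             return code
--     return None
-- ===== Notes on version B (the rewrite author's own statement) =====
-- stated objective: alternative
-- what changed: Instead of per-group substring tests in an if/elif chain, B scans the lowercased subject once position by position, collecting into a set every language code whose keyword starts there, and then returns the first code of the fixed cn>kr>jp priority order present in the set.
import Mathlib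
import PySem

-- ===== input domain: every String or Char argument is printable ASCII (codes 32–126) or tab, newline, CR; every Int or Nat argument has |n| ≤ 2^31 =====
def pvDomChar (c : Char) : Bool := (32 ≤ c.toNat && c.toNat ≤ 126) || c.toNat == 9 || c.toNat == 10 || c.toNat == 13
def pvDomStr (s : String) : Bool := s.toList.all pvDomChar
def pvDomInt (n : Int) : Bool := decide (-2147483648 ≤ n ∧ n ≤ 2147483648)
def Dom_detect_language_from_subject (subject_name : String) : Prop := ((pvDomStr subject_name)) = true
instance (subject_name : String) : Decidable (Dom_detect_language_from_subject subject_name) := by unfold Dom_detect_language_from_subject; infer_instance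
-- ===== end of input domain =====

-- B replaces A's per-group if/elif substring tests by a single positional scan collecting
-- a set of matched codes, resolved afterwards by the fixed cn>kr>jp priority order.


-- ===== PORT A =====
def detect_language_from_subject (subject_name : String) : Option String :=
  let name_lower := PySem.Str.lower subject_name
  if ["chinois", "chinese", "mandarin", "中文"].any (fun x => PySem.Str.isIn x name_lower) then some "cn"
  else if ["coréen", "coreen", "corée", "coree", "korean", "한국어"].any (fun x => PySem.Str.isIn x name_lower) then some "kr"
  else if ["japonais", "japanese", "japon", "日本語"].any (fun x => PySem.Str.isIn x name_lower) then some "jp"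
  else none

-- ===== PORT B =====
-- flat (keyword, code) table, as a list of char-lists × code
def kwTable : List (List Char × String) :=
  [("chinois".toList, "cn"), ("chinese".toList, "cn"), ("mandarin".toList, "cn"), ("中文".toList, "cn"),
   ("coréen".toList, "kr"), ("coreen".toList, "kr"), ("corée".toList, "kr"), ("coree".toList, "kr"),
   ("korean".toList, "kr"), ("한국어".toList, "kr"),
   ("japonais".toList, "jp"), ("japanese".toList, "jp"), ("japon".toList, "jp"), ("日本語".toList, "jp")]

-- Python's s.startswith(kw, i) is exactly kw.toList.isPrefixOf (s.toList.drop i) (code-point sequences).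
-- the scan loop: for i in range(len(s)): for kw, code in KEYWORD_CODES: if s.startswith(kw, i): found.add(code)
def collectCodes (s : List Char) : PySem.Set String :=
  (List.range s.length).foldl (fun acc i =>
    kwTable.foldl (fun acc2 p =>
      if p.1.isPrefixOf (s.drop i) then PySem.Set.add acc2 p.2 else acc2) acc)
    PySem.Set.empty

def detect_language_from_subject_alt (subject_name : String) : Option String :=
  let s := (PySem.Str.lower subject_name).toList
  let found : PySem.Set String := collectCodes s
  ["cn", "kr", "jp"].find? (fun c => PySem.Set.contains found c)

-- ===== PRECONDITION & SPEC =====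
def Spec_detect_language_from_subject (subject_name : String) (out : Option String) : Prop := out = detect_language_from_subject_alt subject_name
instance (subject_name : String) (out : Option String) : Decidable (Spec_detect_language_from_subject subject_name out) := by unfold Spec_detect_language_from_subject; infer_instance

-- ===== CLAIM =====
def Claim_equal_detect_language_from_subject : Prop := ∀ (subject_name : String), Dom_detect_language_from_subject subject_name → Spec_detect_language_from_subject subject_name (detect_language_from_subject subject_name)

-- ===== LEMMAS AND PROOFS =====

-- membership in the inner fold over the keyword table
lemma mem_foldl_table (s : List Char) (i : Nat) (acc : List String) (c : String) :
    c ∈ kwTable.foldl (fun acc2 p =>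
        if p.1.isPrefixOf (s.drop i) then PySem.Set.add acc2 p.2 else acc2) acc ↔
      c ∈ acc ∨ ∃ p ∈ kwTable, p.1.isPrefixOf (s.drop i) ∧ p.2 = c := by
  have H : ∀ (l : List (List Char × String)) (acc : List String),
      c ∈ l.foldl (fun acc2 p =>
        if p.1.isPrefixOf (s.drop i) then PySem.Set.add acc2 p.2 else acc2) acc ↔
      c ∈ acc ∨ ∃ p ∈ l, p.1.isPrefixOf (s.drop i) ∧ p.2 = c := by
    intro l
    induction l with
    | nil => simp
    | cons q l ih =>
      intro acc
      simp only [List.foldl_cons]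
      rw [ih]
      by_cases h : q.1.isPrefixOf (s.drop i)
      · simp only [if_pos h, PySem.Set.mem_add, List.exists_mem_cons_iff]
        constructor
        · rintro ((hm | rfl) | hex)
          · exact Or.inl hm
          · exact Or.inr (Or.inl ⟨h, rfl⟩)
          · exact Or.inr (Or.inr hex)
        · rintro (hm | ⟨_, rfl⟩ | hex)
          · exact Or.inl (Or.inl hm)
          · exact Or.inl (Or.inr rfl)
          · exact Or.inr hex
      · simp only [if_neg h, List.exists_mem_cons_iff]
        constructor
        · rintro (hm | hex)
          · exact Or.inl hm
          · exact Or.inr (Or.inr hex)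
        · rintro (hm | ⟨hpre, _⟩ | hex)
          · exact Or.inl hm
          · exact absurd hpre h
          · exact Or.inr hex
  exact H kwTable acc

-- membership in the whole nested fold
lemma mem_found (s : List Char) (c : String) :
    c ∈ collectCodes s ↔
      ∃ i ∈ List.range s.length, ∃ p ∈ kwTable, p.1.isPrefixOf (s.drop i) ∧ p.2 = c := by
  have H : ∀ (l : List Nat) (acc : List String),
      c ∈ l.foldl (fun acc i =>
        kwTable.foldl (fun acc2 p =>
          if p.1.isPrefixOf (s.drop i) then PySem.Set.add acc2 p.2 else acc2) acc) acc ↔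
      c ∈ acc ∨ ∃ i ∈ l, ∃ p ∈ kwTable, p.1.isPrefixOf (s.drop i) ∧ p.2 = c := by
    intro l
    induction l with
    | nil => simp
    | cons j l ih =>
      intro acc
      rw [List.foldl_cons, ih, mem_foldl_table, List.exists_mem_cons_iff]
      exact or_assoc
  rw [collectCodes, H]
  simp [PySem.Set.empty]

-- bounded positional match = unbounded, for nonempty keywords
lemma exists_range_prefix (kw s : List Char) (h : kw ≠ []) :
    (∃ i ∈ List.range s.length, kw.isPrefixOf (s.drop i)) ↔ ∃ j, kw <+: s.drop j := by
  constructor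
  · rintro ⟨i, _, hp⟩
    exact ⟨i, List.isPrefixOf_iff_prefix.mp hp⟩
  · rintro ⟨j, hp⟩
    by_cases hj : j < s.length
    · exact ⟨j, List.mem_range.mpr hj, List.isPrefixOf_iff_prefix.mpr hp⟩
    · exfalso
      have : s.drop j = [] := List.drop_eq_nil_of_le (Nat.le_of_not_lt hj)
      rw [this] at hp
      exact h (List.prefix_nil.mp hp)

-- a code is collected iff one of its keywords is a substring
lemma found_code (s : List Char) (c : String) :
    c ∈ collectCodes s ↔
      ∃ p ∈ kwTable, p.2 = c ∧ PySem.Chars.isIn p.1 s = true := by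
  rw [mem_found]
  constructor
  · rintro ⟨i, hi, p, hp, hpre, hc⟩
    refine ⟨p, hp, hc, ?_⟩
    exact (PySem.Chars.exists_prefix_drop_iff_isIn p.1 s).mp ⟨i, List.isPrefixOf_iff_prefix.mp hpre⟩
  · rintro ⟨p, hp, hc, hin⟩
    have hne : p.1 ≠ [] := by
      fin_cases hp <;> simp
    obtain ⟨j, hj⟩ := (PySem.Chars.exists_prefix_drop_iff_isIn p.1 s).mpr hin
    obtain ⟨i, hi, hpre⟩ := (exists_range_prefix p.1 s hne).mpr ⟨j, hj⟩
    exact ⟨i, hi, p, hp, hpre, hc⟩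

-- ===== VERDICT =====
lemma contains_collect (subj : String) (c : String) (G : List String)
    (hG : ∀ p ∈ kwTable, p.2 = c → p.1 ∈ G.map String.toList)
    (hG2 : ∀ x ∈ G, (x.toList, c) ∈ kwTable) :
    PySem.Set.contains (collectCodes (PySem.Str.lower subj).toList) c
      = G.any (fun x => PySem.Str.isIn x (PySem.Str.lower subj)) := by
  rw [Bool.eq_iff_iff, PySem.Set.contains_iff, found_code, List.any_eq_true]
  constructor
  · rintro ⟨p, hp, hc, hin⟩
    obtain ⟨x, hx, hxl⟩ := List.mem_map.mp (hG p hp hc)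
    refine ⟨x, hx, ?_⟩
    rw [PySem.Str.isIn_eq, hxl]
    exact hin
  · rintro ⟨x, hx, hin⟩
    refine ⟨(x.toList, c), hG2 x hx, rfl, ?_⟩
    rw [PySem.Str.isIn_eq] at hin
    exact hin

theorem detect_language_from_subject_spec : Claim_equal_detect_language_from_subject := by
  intro subj _
  unfold Spec_detect_language_from_subject detect_language_from_subject detect_language_from_subject_alt
  dsimp only
  rw [List.find?_cons, List.find?_cons, List.find?_cons]
  rw [contains_collect subj "cn" ["chinois", "chinese", "mandarin", "中文"] (by decide) (by decide),
      contains_collect subj "kr" ["coréen", "coreen", "corée", "coree", "korean", "한국어"] (by decide) (by decide),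
      contains_collect subj "jp" ["japonais", "japanese", "japon", "日本語"] (by decide) (by decide)]
  cases h1 : ["chinois", "chinese", "mandarin", "中文"].any (fun x => PySem.Str.isIn x (PySem.Str.lower subj)) <;>
  cases h2 : ["coréen", "coreen", "corée", "coree", "korean", "한국어"].any (fun x => PySem.Str.isIn x (PySem.Str.lower subj)) <;>
  cases h3 : ["japonais", "japanese", "japon", "日本語"].any (fun x => PySem.Str.isIn x (PySem.Str.lower subj)) <;>
  simp
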